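-- pv_equiv track=rewrite | github.com/opethe1st/CompetitiveProgramming | Codility/Chromium2017/ZigZag.py | solution
-- ===== SOURCE A (Python) =====
-- def solution(A):
--     def countGreater(A, a):
--         count = 0
--         for i in range(a - 1):
--             if A[i] > A[a]:
--                 count += 1
--         return count
--
--     dp = [0] * len(A)
--     dp[0] = 1
--     for i in range(1, len(A)):
--         dp[i] = countGreater(A, i) + dp[i - 1] + 1
--     return sum(dp)
-- ===== SOURCE B (Python) =====
-- def solution(A):
--     n = len(A)
--     total = n * (n + 1) // 2
--     for j in range(n - 2):
--         for k in range(j + 2, n):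
--             if A[j] > A[k]:
--                 total += n - k
--     return total
-- ===== Notes on version B (the rewrite author's own statement) =====
-- stated objective: alternative
-- what changed: Replaces the dp array (prefix-count recurrence dp[i]=countGreater+dp[i-1]+1 plus a final sum) by direct weighted pair counting: a closed-form triangular base n(n+1)/2 plus, for each earlier element A[j], the weight n-k for every later k>=j+2 with A[j]>A[k].
import Mathlib
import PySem

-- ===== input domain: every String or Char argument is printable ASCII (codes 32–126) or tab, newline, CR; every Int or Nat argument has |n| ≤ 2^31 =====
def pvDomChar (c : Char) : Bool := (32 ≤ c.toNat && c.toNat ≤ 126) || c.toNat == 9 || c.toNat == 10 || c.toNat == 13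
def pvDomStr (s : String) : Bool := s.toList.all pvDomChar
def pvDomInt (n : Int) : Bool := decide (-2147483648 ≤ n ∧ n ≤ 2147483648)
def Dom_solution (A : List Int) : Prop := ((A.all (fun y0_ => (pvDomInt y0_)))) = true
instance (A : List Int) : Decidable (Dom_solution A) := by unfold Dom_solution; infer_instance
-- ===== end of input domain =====

-- B replaces A's dp-array recurrence (dp[i] = countGreater + dp[i-1] + 1, then sum(dp)) by direct
-- weighted pair counting: a closed-form base n(n+1)/2 plus weight n-k for every pair j+2 <= k with A[j] > A[k].

-- ===== PORT A =====
def countGreater (A : List Int) (a : Int) : Int :=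
  (PySem.List.pyRange 0 (a - 1) 1).foldl
    (fun count i =>
      if PySem.List.pyGetD A i 0 > PySem.List.pyGetD A a 0 then count + 1 else count) 0

def solution (A : List Int) : Int :=
  let dp0 : List Int := List.replicate A.length 0
  -- dp[0] = 1 : IndexError on the empty list, excluded by Pre_solution
  let dp1 : List Int := PySem.List.pySetD dp0 0 1
  let dp2 : List Int :=
    (PySem.List.pyRange 1 (A.length : Int) 1).foldl
      (fun dp i =>
        PySem.List.pySetD dp i (countGreater A i + PySem.List.pyGetD dp (i - 1) 0 + 1)) dp1
  dp2.sum

-- ===== PORT B =====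
def solution_alt (A : List Int) : Int :=
  let n : Int := (A.length : Int)
  (PySem.List.pyRange 0 (n - 2) 1).foldl
    (fun total j =>
      (PySem.List.pyRange (j + 2) n 1).foldl
        (fun total k =>
          if PySem.List.pyGetD A j 0 > PySem.List.pyGetD A k 0 then total + (n - k) else total)
        total)
    (PySem.Int.floordiv (n * (n + 1)) 2)

-- ===== PRECONDITION & SPEC =====
-- Pre_ excludes only the empty list, on which A raises IndexError (dp[0] = 1 on an empty dp).
def Pre_solution (A : List Int) : Prop := A ≠ []
instance (A : List Int) : Decidable (Pre_solution A) := by unfold Pre_solution; infer_instance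

def pvWitness_solution : List Int := [3, 1, 2]

def Spec_solution (A : List Int) (out : Int) : Prop := out = solution_alt A
instance (A : List Int) (out : Int) : Decidable (Spec_solution A out) := by unfold Spec_solution; infer_instance

-- ===== CLAIM (what is proved, stated in full; the proofs are below) =====
def Claim_equal_solution : Prop := ∀ (A : List Int), Dom_solution A → Pre_solution A → Spec_solution A (solution A)

-- ===== LEMMAS AND PROOFS =====

-- proof-side abstractions of the common content of both programs:
-- pvInd: does position j hold an element greater than the one at position k;
-- pvCg k: how many positions j < k-1 do (the value of A's countGreater at k);
-- pvD: the value A's dp recurrence stores at an index.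
def pvInd (A : List Int) (j k : Nat) : Int := if A.getD j 0 > A.getD k 0 then 1 else 0
def pvCg (A : List Int) (k : Nat) : Int := ∑ j ∈ Finset.range (k - 1), pvInd A j k
def pvD (A : List Int) : Nat → Int
  | 0 => 1
  | m + 1 => pvCg A (m + 1) + pvD A m + 1

lemma countGreater_eval (A : List Int) (k : Nat) : countGreater A (k : Int) = pvCg A k := by
  unfold countGreater pvCg pvInd
  rcases k with _ | m
  · simp [PySem.List.pyRange_one_eq_nil]
  · have h1 : ((m + 1 : Nat) : Int) - 1 = (m : Nat) := by push_cast; ring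
    rw [h1, PySem.List.pyRange_zero_natCast, List.foldl_map]
    have h2 : (fun (count : Int) (j : Nat) =>
        if PySem.List.pyGetD A (↑j) 0 > PySem.List.pyGetD A (↑(m+1) : Int) 0 then count + 1 else count)
        = (fun count j => count + (if A.getD j 0 > A.getD (m+1) 0 then 1 else 0)) := by
      funext c j
      simp only [PySem.List.pyGetD_natCast, gt_iff_lt]
      split <;> simp [*]
    rw [h2, PySem.List.foldl_add]
    show 0 + ((List.range m).map _).sum = _
    rw [zero_add]
    rfl

lemma set_map_range (n i : Nat) (f : Nat → Int) (v : Int) :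
    ((List.range n).map f).set i v = (List.range n).map (fun m => if m = i then v else f m) := by
  apply List.ext_getElem
  · simp
  · intro m h1 h2
    simp only [List.getElem_set, List.getElem_map, List.getElem_range]
    rcases eq_or_ne i m with rfl | hne
    · simp
    · rw [if_neg hne, if_neg (fun hh => hne hh.symm)]

lemma loopInv (A : List Int) (i : Nat) (hi : i < A.length) :
    (PySem.List.pyRange 1 ((1 + i : Nat) : Int) 1).foldl
        (fun dp x => PySem.List.pySetD dp x (countGreater A x + PySem.List.pyGetD dp (x - 1) 0 + 1))
        (PySem.List.pySetD (List.replicate A.length 0) 0 1)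
      = (List.range A.length).map (fun m => if m ≤ i then pvD A m else 0) := by
  induction i with
  | zero =>
    rw [show ((1 + 0 : Nat) : Int) = 1 by norm_num,
        PySem.List.pyRange_one_eq_nil (by omega), List.foldl_nil,
        show (0 : Int) = ((0 : Nat) : Int) by norm_num, PySem.List.pySetD_natCast]
    apply List.ext_getElem
    · simp
    · intro m h1 h2
      simp only [List.getElem_set, List.getElem_replicate, List.getElem_map, List.getElem_range]
      rcases Nat.eq_zero_or_pos m with hm | hm
      · subst hm; simp [pvD]
      · rw [if_neg (by omega), if_neg (by omega)]
  | succ i ih =>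
    have hii : i < A.length := by omega
    rw [show ((1 + (i+1) : Nat) : Int) = ((1 + i : Nat) : Int) + 1 by push_cast; ring,
        PySem.List.pyRange_one_succ_right (by push_cast; omega), List.foldl_append,
        List.foldl_cons, List.foldl_nil, ih hii]
    rw [show ((1 + i : Nat) : Int) - 1 = ((i : Nat) : Int) by push_cast; ring,
        PySem.List.pyGetD_natCast, countGreater_eval,
        PySem.List.pySetD_natCast, List.getD_eq_getElem?_getD,
        List.getElem?_map, List.getElem?_range hii]
    simp only [Option.map_some, Option.getD_some, if_pos (le_refl i)]
    rw [set_map_range]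
    apply List.map_congr_left
    intro m hm
    by_cases h1 : m = 1 + i
    · rw [if_pos h1, if_pos (by omega)]
      subst h1
      rw [show 1 + i = i + 1 from Nat.add_comm 1 i]
      rfl
    · rw [if_neg h1]
      by_cases h2 : m ≤ i
      · rw [if_pos h2, if_pos (by omega)]
      · rw [if_neg h2, if_neg (by omega)]

lemma solution_sum (A : List Int) (h : A ≠ []) :
    solution A = ∑ m ∈ Finset.range A.length, pvD A m := by
  have hn : 0 < A.length := List.length_pos_of_ne_nil h
  unfold solution
  simp only []
  rw [show ((A.length : Nat) : Int) = ((1 + (A.length - 1) : Nat) : Int) by congr 1; omega,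
      loopInv A (A.length - 1) (by omega)]
  rw [show (∑ m ∈ Finset.range A.length, pvD A m)
        = ((List.range A.length).map (fun m => pvD A m)).sum from rfl]
  congr 1
  apply List.map_congr_left
  intro m hm
  rw [if_pos (by simp at hm; omega)]

lemma pvD_closed (A : List Int) (m : Nat) :
    pvD A m = ((m : Int) + 1) + ∑ k ∈ Finset.range m, pvCg A (k + 1) := by
  induction m with
  | zero => simp [pvD]
  | succ m ih =>
    rw [show pvD A (m+1) = pvCg A (m + 1) + pvD A m + 1 from rfl, ih,
        Finset.sum_range_succ]
    push_cast
    ring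

lemma gauss (n : Nat) : ∑ m ∈ Finset.range n, ((m : Int) + 1) = ((n * (n + 1) / 2 : Nat) : Int) := by
  have h1 : (∑ m ∈ Finset.range n, m) * 2 = n * (n - 1) := Finset.sum_range_id_mul_two n
  have h2 : ∑ m ∈ Finset.range n, (m + 1) = (∑ m ∈ Finset.range n, m) + n := by
    rw [Finset.sum_add_distrib, Finset.sum_const, Finset.card_range, smul_eq_mul, mul_one]
  have h4 : n * (n + 1) = n * (n - 1) + 2 * n := by
    cases n with
    | zero => rfl
    | succ m => simp only [Nat.add_sub_cancel]; ring
  have h3 : ∑ m ∈ Finset.range n, (m + 1) = n * (n + 1) / 2 := by omega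
  calc ∑ m ∈ Finset.range n, ((m : Int) + 1) = ((∑ m ∈ Finset.range n, (m + 1) : Nat) : Int) := by
        push_cast; rfl
    _ = _ := by rw [h3]

lemma triangle (n : Nat) (g : Nat → Int) :
    ∑ m ∈ Finset.range n, ∑ k ∈ Finset.range m, g k
      = ∑ k ∈ Finset.range n, ((n : Int) - 1 - k) * g k := by
  induction n with
  | zero => simp
  | succ n ih =>
    calc ∑ m ∈ Finset.range (n+1), ∑ k ∈ Finset.range m, g k
        = (∑ m ∈ Finset.range n, ∑ k ∈ Finset.range m, g k) + ∑ k ∈ Finset.range n, g k :=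
          Finset.sum_range_succ _ n
      _ = (∑ k ∈ Finset.range n, ((n:Int)-1-k)*g k) + ∑ k ∈ Finset.range n, g k := by rw [ih]
      _ = ∑ k ∈ Finset.range n, (((n:Int)+1)-1-k)*g k := by
          rw [← Finset.sum_add_distrib]; exact Finset.sum_congr rfl fun k _ => by ring
      _ = ∑ k ∈ Finset.range (n+1), (((n+1:Nat):Int)-1-k)*g k := by
          rw [Finset.sum_range_succ]; push_cast
          rw [show ((n:Int)+1-1-n)*g n = 0 by ring, add_zero]

lemma weight_reindex (n : Nat) (hn : 0 < n) (c : Nat → Int) (h0 : c 0 = 0) :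
    ∑ k ∈ Finset.range n, ((n : Int) - 1 - k) * c (k + 1)
      = ∑ k ∈ Finset.range n, ((n : Int) - k) * c k := by
  obtain ⟨p, rfl⟩ : ∃ p, n = p + 1 := ⟨n - 1, by omega⟩
  rw [Finset.sum_range_succ, Finset.sum_range_succ']
  rw [h0, mul_zero, add_zero,
      show (((p+1:Nat):Int)-1-(p:Int)) * c (p+1) = 0 by push_cast; ring, add_zero]
  exact Finset.sum_congr rfl fun k _ => by push_cast; ring

lemma sum_pvD (A : List Int) (h : A ≠ []) :
    ∑ m ∈ Finset.range A.length, pvD A m =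
      ((A.length * (A.length + 1) / 2 : Nat) : Int) +
        ∑ k ∈ Finset.range A.length, ((A.length : Int) - k) * pvCg A k := by
  have hn : 0 < A.length := List.length_pos_of_ne_nil h
  calc ∑ m ∈ Finset.range A.length, pvD A m
      = ∑ m ∈ Finset.range A.length, (((m : Int) + 1) + ∑ k ∈ Finset.range m, pvCg A (k + 1)) :=
        Finset.sum_congr rfl fun m _ => pvD_closed A m
    _ = (∑ m ∈ Finset.range A.length, ((m : Int) + 1))
          + ∑ m ∈ Finset.range A.length, ∑ k ∈ Finset.range m, pvCg A (k + 1) := Finset.sum_add_distrib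
    _ = ((A.length * (A.length + 1) / 2 : Nat) : Int)
          + ∑ k ∈ Finset.range A.length, ((A.length : Int) - 1 - k) * pvCg A (k + 1) := by
        rw [gauss, triangle]
    _ = _ := by rw [weight_reindex A.length hn (pvCg A) (by simp [pvCg])]

lemma sum_map_pyRange (h : Int → Int) (a b : Int) :
    (List.map h (PySem.List.pyRange a b 1)).sum = ∑ t ∈ Finset.range ((b - a).toNat), h (a + t) := by
  rw [PySem.List.pyRange_one, List.map_map]
  rfl

lemma inner_eval (A : List Int) (jn : Nat) :
    ∑ t ∈ Finset.range (A.length - (jn + 2)),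
        (if A.getD jn 0 > A.getD (jn + 2 + t) 0 then ((A.length : Int) - (jn + 2 + t : Nat)) else 0)
      = ∑ k ∈ Finset.range A.length,
          (if jn + 2 ≤ k then ((A.length : Int) - k) * pvInd A jn k else 0) := by
  have hfil : (Finset.range A.length).filter (fun k => jn + 2 ≤ k) = Finset.Ico (jn + 2) A.length := by
    ext k; simp [Finset.mem_Ico, Finset.mem_filter, Finset.mem_range]; omega
  conv_rhs => rw [← Finset.sum_filter, hfil, Finset.sum_Ico_eq_sum_range]
  apply Finset.sum_congr rfl
  intro t _
  unfold pvInd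
  by_cases hc : A.getD jn 0 > A.getD (jn + 2 + t) 0
  · rw [if_pos hc, if_pos hc, mul_one]
  · rw [if_neg hc, if_neg hc, mul_zero]

lemma per_k (A : List Int) (k : Nat) (hk : k < A.length) :
    ∑ j ∈ Finset.range A.length,
        (if j + 2 ≤ k then ((A.length : Int) - k) * pvInd A j k else 0)
      = ((A.length : Int) - k) * pvCg A k := by
  have hfil : (Finset.range A.length).filter (fun j => j + 2 ≤ k) = Finset.range (k - 1) := by
    ext j; simp [Finset.mem_filter, Finset.mem_range]; omega
  conv_lhs => rw [← Finset.sum_filter, hfil]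
  rw [pvCg, Finset.mul_sum]

lemma solution_alt_sum (A : List Int) :
    solution_alt A = ((A.length * (A.length + 1) / 2 : Nat) : Int) +
        ∑ k ∈ Finset.range A.length, ((A.length : Int) - k) * pvCg A k := by
  unfold solution_alt
  simp only []
  have hinner : ∀ (j total : Int),
      (PySem.List.pyRange (j + 2) (A.length : Int) 1).foldl
        (fun total k =>
          if PySem.List.pyGetD A j 0 > PySem.List.pyGetD A k 0 then total + ((A.length : Int) - k) else total)
        total
      = total + ((PySem.List.pyRange (j + 2) (A.length : Int) 1).map
          (fun k => if PySem.List.pyGetD A j 0 > PySem.List.pyGetD A k 0 then ((A.length : Int) - k) else 0)).sum := by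
    intro j total
    rw [show (fun (total k : Int) =>
          if PySem.List.pyGetD A j 0 > PySem.List.pyGetD A k 0 then total + ((A.length : Int) - k) else total)
        = (fun total k => total + (if PySem.List.pyGetD A j 0 > PySem.List.pyGetD A k 0 then ((A.length : Int) - k) else 0)) from
        funext fun c => funext fun k => by split <;> simp]
    rw [PySem.List.foldl_add]
  simp only [hinner]
  rw [PySem.List.foldl_add]
  rw [show PySem.Int.floordiv ((A.length : Int) * ((A.length : Int) + 1)) 2
        = ((A.length * (A.length + 1) / 2 : Nat) : Int) from by
      exact_mod_cast PySem.Int.floordiv_natCast (A.length * (A.length + 1)) 2]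
  congr 1
  rw [sum_map_pyRange, show ((A.length : Int) - 2 - 0).toNat = A.length - 2 by omega]
  calc ∑ jn ∈ Finset.range (A.length - 2),
        ((PySem.List.pyRange ((0 : Int) + jn + 2) (A.length : Int) 1).map
          (fun k => if PySem.List.pyGetD A ((0 : Int) + jn) 0 > PySem.List.pyGetD A k 0 then ((A.length : Int) - k) else 0)).sum
      = ∑ jn ∈ Finset.range (A.length - 2),
          ∑ k ∈ Finset.range A.length, (if jn + 2 ≤ k then ((A.length : Int) - k) * pvInd A jn k else 0) := by
        apply Finset.sum_congr rfl
        intro jn _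
        rw [sum_map_pyRange, show ((A.length : Int) - ((0 : Int) + jn + 2)).toNat = A.length - (jn + 2) by omega,
            ← inner_eval A jn]
        apply Finset.sum_congr rfl
        intro t _
        have e1 : (0 : Int) + (jn : Int) = ((jn : Nat) : Int) := by ring
        have e2 : (0 : Int) + (jn : Int) + 2 + (t : Int) = ((jn + 2 + t : Nat) : Int) := by push_cast; ring
        rw [e2, e1, PySem.List.pyGetD_natCast, PySem.List.pyGetD_natCast]
    _ = ∑ jn ∈ Finset.range A.length,
          ∑ k ∈ Finset.range A.length, (if jn + 2 ≤ k then ((A.length : Int) - k) * pvInd A jn k else 0) := by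
        apply Finset.sum_subset (Finset.range_subset_range.mpr (Nat.sub_le A.length 2))
        intro jn hjn hjn2
        apply Finset.sum_eq_zero
        intro k hk
        simp only [Finset.mem_range] at hjn hjn2 hk
        exact if_neg (by omega)
    _ = ∑ k ∈ Finset.range A.length,
          ∑ jn ∈ Finset.range A.length, (if jn + 2 ≤ k then ((A.length : Int) - k) * pvInd A jn k else 0) :=
        Finset.sum_comm
    _ = ∑ k ∈ Finset.range A.length, ((A.length : Int) - k) * pvCg A k := by
        apply Finset.sum_congr rfl
        intro k hk
        exact per_k A k (Finset.mem_range.mp hk)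

-- ===== VERDICT (by name: the statement is the Claim_ definition above) =====
theorem solution_spec : Claim_equal_solution := by
  intro A _ hpre
  unfold Spec_solution
  rw [solution_sum A hpre, sum_pvD A hpre, solution_alt_sum A]
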